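-- pv_equiv track=rewrite | github.com/piercefreeman/gpt-json | gpt_json/transformations.py | fix_bools
-- ===== SOURCE A (Python) =====
-- def fix_bools(json_str):
--     """
--     The model will relatively commonly return booleans as capitalized values because of the
--     usage of caps in other languages common in the training set (like Python).
--
--     """
--     modified = False
--     open_quotes = False
--     fixed_str = ""
--
--     i = 0
--     while i < len(json_str):
--         char = json_str[i]
--
--         # Check if the current character is an opening or closing quote
--         if char == '"' and i > 0 and json_str[i - 1] != "\\":
--             open_quotes = not open_quotes
--
--         # If not inside a string, check for "True" or "False" to replace
--         if not open_quotes: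
--             if json_str[i : i + 4] == "True":
--                 fixed_str += "true"
--                 modified = True
--                 i += 3  # Skip the remaining characters of "True"
--             elif json_str[i : i + 5] == "False":
--                 fixed_str += "false"
--                 modified = True
--                 i += 4  # Skip the remaining characters of "False"
--             else:
--                 fixed_str += char
--         else:
--             fixed_str += char
--         i += 1
--
--     return fixed_str, modified
-- ===== SOURCE B (Python) =====
-- def fix_bools(json_str):
--     # Split into segments tagged inside/outside JSON strings (same quote rule as
--     # the scanner: a quote toggles only when i > 0 and the previous char is not
--     # a backslash; the opening quote belongs to the inside segment), then fix
--     # booleans in the outside segments with str.replace.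
--     segments = []  # list of (is_inside, text)
--     buf = []
--     inside = False
--     for i, ch in enumerate(json_str):
--         toggles = ch == '"' and i > 0 and json_str[i - 1] != "\\"
--         if toggles and not inside:
--             segments.append((False, "".join(buf)))
--             buf = [ch]
--             inside = True
--         elif toggles and inside:
--             segments.append((True, "".join(buf)))
--             buf = [ch]
--             inside = False
--         else:
--             buf.append(ch)
--     segments.append((inside, "".join(buf)))
--     fixed_str = "".join(
--         text if is_inside else text.replace("True", "true").replace("False", "false")
--         for is_inside, text in segments
--     )
--     return fixed_str, fixed_str != json_str
-- ===== Notes on version B (the rewrite author's own statement) =====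
-- stated objective: simpler
-- what changed: A's single index-jumping scanner (manual i+=3/i+=4 skips and char-by-char accumulation with a modified flag) is replaced by a split of the input into inside/outside-string segments under the same quote rule, with str.replace('True','true') and str.replace('False','false') applied to each outside segment and modified computed as fixed_str != json_str.
import Mathlib
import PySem

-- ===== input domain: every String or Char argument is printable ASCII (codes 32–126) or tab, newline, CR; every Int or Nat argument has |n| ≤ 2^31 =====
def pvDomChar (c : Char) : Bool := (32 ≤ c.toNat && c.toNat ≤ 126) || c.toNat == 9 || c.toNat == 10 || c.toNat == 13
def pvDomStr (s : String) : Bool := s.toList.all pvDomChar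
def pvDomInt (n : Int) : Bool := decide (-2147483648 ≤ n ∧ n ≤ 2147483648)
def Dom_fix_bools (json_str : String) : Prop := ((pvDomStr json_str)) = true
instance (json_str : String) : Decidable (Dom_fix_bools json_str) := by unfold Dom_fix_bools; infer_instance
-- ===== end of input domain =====

-- B replaces A's index-jumping scanner by a split into inside/outside-string segments
-- with str.replace applied to the outside segments (objective: simpler decomposition).

-- ===== PORT A =====
-- A's while-loop: index i, open_quotes flag, accumulated fixed_str, modified flag.
def pvLoopA (s : List Char) (i : Nat) (open_quotes : Bool) (fixed_str : List Char)
    (modified : Bool) : List Char × Bool :=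
  if i < s.length then
    let char := s.getD i ' '
    let open_quotes' :=
      if char = '"' ∧ 0 < i ∧ s.getD (i - 1) ' ' ≠ '\\' then !open_quotes else open_quotes
    if open_quotes' = false then
      if PySem.List.slice s (some (i : Int)) (some ((i : Int) + 4)) = "True".toList then
        pvLoopA s (i + 4) open_quotes' (fixed_str ++ "true".toList) true
      else if PySem.List.slice s (some (i : Int)) (some ((i : Int) + 5)) = "False".toList then
        pvLoopA s (i + 5) open_quotes' (fixed_str ++ "false".toList) true
      else
        pvLoopA s (i + 1) open_quotes' (fixed_str ++ [char]) modified
    else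
      pvLoopA s (i + 1) open_quotes' (fixed_str ++ [char]) modified
  else (fixed_str, modified)
termination_by s.length - i
decreasing_by all_goals omega

def fix_bools (json_str : String) : String × Bool :=
  let r := pvLoopA json_str.toList 0 false [] false
  (String.ofList r.1, r.2)

-- ===== PORT B =====
-- one step of B's segment-building loop over enumerate(json_str)
def pvStepB (s : List Char) (st : List (Bool × List Char) × List Char × Bool)
    (p : Int × Char) : List (Bool × List Char) × List Char × Bool :=
  let toggles := p.2 = '"' ∧ 0 < p.1 ∧ PySem.List.pyGetD s (p.1 - 1) ' ' ≠ '\\'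
  if toggles ∧ st.2.2 = false then (st.1 ++ [(false, st.2.1)], [p.2], true)
  else if toggles ∧ st.2.2 = true then (st.1 ++ [(true, st.2.1)], [p.2], false)
  else (st.1, st.2.1 ++ [p.2], st.2.2)

-- the per-segment fix: inside segments kept, outside segments via str.replace twice
def pvFixSeg (seg : Bool × List Char) : List Char :=
  if seg.1 then seg.2
  else PySem.Chars.replace (PySem.Chars.replace seg.2 "True".toList "true".toList)
         "False".toList "false".toList

def fix_bools_alt (json_str : String) : String × Bool :=
  let s := json_str.toList
  let st := (PySem.List.enumerate s).foldl (pvStepB s) ([], [], false)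
  let segments := st.1 ++ [(st.2.2, st.2.1)]
  let fixed_str := (segments.map pvFixSeg).flatten
  (String.ofList fixed_str, decide (String.ofList fixed_str ≠ json_str))

-- ===== PRECONDITION & SPEC =====
def Spec_fix_bools (json_str : String) (out : String × Bool) : Prop := out = fix_bools_alt json_str
instance (json_str : String) (out : String × Bool) : Decidable (Spec_fix_bools json_str out) := by unfold Spec_fix_bools; infer_instance

-- ===== CLAIM (what is proved, stated in full; the proofs are below) =====
def Claim_equal_fix_bools : Prop := ∀ (json_str : String), Dom_fix_bools json_str → Spec_fix_bools json_str (fix_bools json_str)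

-- ===== LEMMAS AND PROOFS =====

-- proof-side: the quote-toggle test at position i
def pvTog (s : List Char) (i : Nat) : Bool :=
  decide (s.getD i ' ' = '"' ∧ 0 < i ∧ s.getD (i - 1) ' ' ≠ '\\')

-- prepend one char / a buffer to the first segment
def pvConsHead (c : Char) : List (Bool × List Char) → List (Bool × List Char)
  | [] => [(false, [c])]
  | (t, cs) :: r => (t, c :: cs) :: r

def pvPrepHead (buf : List Char) : List (Bool × List Char) → List (Bool × List Char)
  | [] => [(false, buf)]
  | (t, cs) :: r => (t, buf ++ cs) :: r

-- the segments of the suffix of s starting at i, given in-string state q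
def pvBsegs (s : List Char) (i : Nat) (q : Bool) : List (Bool × List Char) :=
  if i < s.length then
    if pvTog s i then (q, []) :: pvConsHead (s.getD i ' ') (pvBsegs s (i + 1) (!q))
    else pvConsHead (s.getD i ' ') (pvBsegs s (i + 1) q)
  else [(q, [])]
termination_by s.length - i

def pvRender (L : List (Bool × List Char)) : List Char := (L.map pvFixSeg).flatten

-- Python str.replace as a leftmost single-pass scan
def pvScanRepl (old new : List Char) : List Char → List Char
  | [] => []
  | c :: cs =>
    if old <+: (c :: cs) then new ++ pvScanRepl old new (cs.drop (old.length - 1))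
    else c :: pvScanRepl old new cs
termination_by l => l.length
decreasing_by all_goals (simp only [List.length_drop, List.length_cons]; omega)

-- A's simultaneous True/False outside-string replacement, as a scan
def pvEmit : List Char → List Char
  | [] => []
  | c :: cs =>
    if ['T','r','u','e'] <+: (c :: cs) then 't'::'r'::'u'::'e':: pvEmit (cs.drop 3)
    else if ['F','a','l','s','e'] <+: (c :: cs) then 'f'::'a'::'l'::'s'::'e':: pvEmit (cs.drop 4)
    else c :: pvEmit cs
termination_by l => l.length
decreasing_by all_goals (simp only [List.length_drop, List.length_cons]; omega)

theorem pvTl : "True".toList = ['T','r','u','e'] := by decide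
theorem pvtl : "true".toList = ['t','r','u','e'] := by decide
theorem pvFl : "False".toList = ['F','a','l','s','e'] := by decide
theorem pvfl : "false".toList = ['f','a','l','s','e'] := by decide

theorem pvGo_eq_scanRepl (old new : List Char) (hold : old ≠ []) :
    ∀ (fuel : Nat) (l acc : List Char), l.length ≤ fuel →
      PySem.Chars.replace.go old new fuel l acc = acc.reverse ++ pvScanRepl old new l := by
  intro fuel
  induction fuel with
  | zero =>
    intro l acc hl
    have hnil : l = [] := List.eq_nil_of_length_eq_zero (by omega)
    subst hnil
    rw [PySem.Chars.replace.go]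
    simp [pvScanRepl]
  | succ n ih =>
    intro l acc hl
    cases l with
    | nil =>
      rw [PySem.Chars.replace.go]
      simp [pvScanRepl]
      omega
    | cons c t =>
      rw [PySem.Chars.replace.go]
      by_cases hp : old <+: (c :: t)
      · rw [if_pos (List.isPrefixOf_iff_prefix.mpr hp)]
        obtain ⟨o, os, rfl⟩ : ∃ o os, old = o :: os := by
          cases old with
          | nil => exact absurd rfl hold
          | cons o os => exact ⟨o, os, rfl⟩
        rw [ih _ _ (by simp at hl ⊢; omega)]
        rw [pvScanRepl, if_pos hp]
        simp
      · rw [if_neg (fun hh => hp (List.isPrefixOf_iff_prefix.mp hh))]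
        rw [ih _ _ (by simp at hl ⊢; omega)]
        rw [pvScanRepl, if_neg hp]
        simp

theorem pvReplace_eq_scanRepl (l old new : List Char) (hold : old ≠ []) :
    PySem.Chars.replace l old new = pvScanRepl old new l := by
  rw [PySem.Chars.replace.eq_def, if_neg (by simpa [List.isEmpty_iff] using hold)]
  simpa using pvGo_eq_scanRepl old new hold l.length l [] le_rfl

theorem pvPrefix_scanT (p : List Char) (hp : ∀ c ∈ p, c ≠ 'T' ∧ c ≠ 't') :
    ∀ l, (p <+: pvScanRepl ['T','r','u','e'] ['t','r','u','e'] l ↔ p <+: l) := by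
  induction p with
  | nil => intro l; simp
  | cons d p' ih =>
    intro l
    match l with
    | [] => simp [pvScanRepl]
    | c :: cs =>
      rw [pvScanRepl]
      by_cases hT : ['T','r','u','e'] <+: (c :: cs)
      · rw [if_pos hT]
        have hc : c = 'T' := ((List.cons_prefix_cons.mp hT).1).symm
        constructor
        · intro hpre
          exact absurd (List.cons_prefix_cons.mp hpre).1 (hp d (by simp)).2
        · intro hpre
          exact absurd ((List.cons_prefix_cons.mp hpre).1.trans hc)
            (hp d (by simp)).1
      · rw [if_neg hT]
        rw [List.cons_prefix_cons, List.cons_prefix_cons,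
          ih (fun x hx => hp x (by simp [hx])) cs]

theorem pvNoPrefix_of_head_ne (a b : Char) (l1 l2 : List Char) (h : a ≠ b) :
    ¬ (a :: l1 <+: b :: l2) := fun hh => h (List.cons_prefix_cons.mp hh).1

theorem pvScanF_skip_true (X : List Char) :
    pvScanRepl ['F','a','l','s','e'] ['f','a','l','s','e'] ('t'::'r'::'u'::'e'::X)
      = 't'::'r'::'u'::'e':: pvScanRepl ['F','a','l','s','e'] ['f','a','l','s','e'] X := by
  rw [pvScanRepl, if_neg (pvNoPrefix_of_head_ne _ _ _ _ (by decide)),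
    pvScanRepl, if_neg (pvNoPrefix_of_head_ne _ _ _ _ (by decide)),
    pvScanRepl, if_neg (pvNoPrefix_of_head_ne _ _ _ _ (by decide)),
    pvScanRepl, if_neg (pvNoPrefix_of_head_ne _ _ _ _ (by decide))]

theorem pvScanT_skip_false (X : List Char) :
    pvScanRepl ['T','r','u','e'] ['t','r','u','e'] ('F'::'a'::'l'::'s'::'e'::X)
      = 'F'::'a'::'l'::'s'::'e':: pvScanRepl ['T','r','u','e'] ['t','r','u','e'] X := by
  rw [pvScanRepl, if_neg (pvNoPrefix_of_head_ne _ _ _ _ (by decide)),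
    pvScanRepl, if_neg (pvNoPrefix_of_head_ne _ _ _ _ (by decide)),
    pvScanRepl, if_neg (pvNoPrefix_of_head_ne _ _ _ _ (by decide)),
    pvScanRepl, if_neg (pvNoPrefix_of_head_ne _ _ _ _ (by decide)),
    pvScanRepl, if_neg (pvNoPrefix_of_head_ne _ _ _ _ (by decide))]

theorem pvScanT_true (X : List Char) :
    pvScanRepl ['T','r','u','e'] ['t','r','u','e'] ('T'::'r'::'u'::'e'::X)
      = 't'::'r'::'u'::'e':: pvScanRepl ['T','r','u','e'] ['t','r','u','e'] X := by
  rw [pvScanRepl, if_pos ⟨X, rfl⟩]; simp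

theorem pvScanF_false (X : List Char) :
    pvScanRepl ['F','a','l','s','e'] ['f','a','l','s','e'] ('F'::'a'::'l'::'s'::'e'::X)
      = 'f'::'a'::'l'::'s'::'e':: pvScanRepl ['F','a','l','s','e'] ['f','a','l','s','e'] X := by
  rw [pvScanRepl, if_pos ⟨X, rfl⟩]; simp

theorem pvScanT_char (c : Char) (cs : List Char) (hT : ¬ ['T','r','u','e'] <+: (c :: cs)) :
    pvScanRepl ['T','r','u','e'] ['t','r','u','e'] (c :: cs)
      = c :: pvScanRepl ['T','r','u','e'] ['t','r','u','e'] cs := by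
  rw [pvScanRepl, if_neg hT]

theorem pvScanF_char (c : Char) (cs : List Char) (hF : ¬ ['F','a','l','s','e'] <+: (c :: cs)) :
    pvScanRepl ['F','a','l','s','e'] ['f','a','l','s','e'] (c :: cs)
      = c :: pvScanRepl ['F','a','l','s','e'] ['f','a','l','s','e'] cs := by
  rw [pvScanRepl, if_neg hF]

theorem pvEmit_true (X : List Char) :
    pvEmit ('T'::'r'::'u'::'e'::X) = 't'::'r'::'u'::'e':: pvEmit X := by
  rw [pvEmit, if_pos ⟨X, rfl⟩]; simp

theorem pvEmit_false (X : List Char) :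
    pvEmit ('F'::'a'::'l'::'s'::'e'::X) = 'f'::'a'::'l'::'s'::'e':: pvEmit X := by
  rw [pvEmit, if_neg (pvNoPrefix_of_head_ne _ _ _ _ (by decide)), if_pos ⟨X, rfl⟩]; simp

theorem pvEmit_char (c : Char) (cs : List Char) (hT : ¬ ['T','r','u','e'] <+: (c :: cs))
    (hF : ¬ ['F','a','l','s','e'] <+: (c :: cs)) :
    pvEmit (c :: cs) = c :: pvEmit cs := by
  rw [pvEmit, if_neg hT, if_neg hF]

theorem pvScan_comp (l : List Char) :
    pvScanRepl ['F','a','l','s','e'] ['f','a','l','s','e']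
      (pvScanRepl ['T','r','u','e'] ['t','r','u','e'] l) = pvEmit l := by
  have H : ∀ (n : Nat) (l : List Char), l.length ≤ n →
      pvScanRepl ['F','a','l','s','e'] ['f','a','l','s','e']
        (pvScanRepl ['T','r','u','e'] ['t','r','u','e'] l) = pvEmit l := by
    intro n
    induction n with
    | zero =>
      intro l hl
      have hnil : l = [] := List.eq_nil_of_length_eq_zero (by omega)
      subst hnil
      simp [pvScanRepl, pvEmit]
    | succ n ih =>
      intro l hl
      match l with
      | [] => simp [pvScanRepl, pvEmit]
      | c :: cs =>
        by_cases hT : ['T','r','u','e'] <+: (c :: cs)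
        · obtain ⟨rest, hrest⟩ := hT
          rw [← hrest] at hl ⊢
          simp only [List.cons_append, List.nil_append, List.length_cons] at hl ⊢
          rw [pvScanT_true, pvScanF_skip_true, ih rest (by omega), pvEmit_true]
        · by_cases hF : ['F','a','l','s','e'] <+: (c :: cs)
          · obtain ⟨rest, hrest⟩ := hF
            rw [← hrest] at hl ⊢
            simp only [List.cons_append, List.nil_append, List.length_cons] at hl ⊢
            rw [pvScanT_skip_false, pvScanF_false, ih rest (by omega)]
            rw [← hrest] at hT
            simp only [List.cons_append, List.nil_append] at hT
            rw [pvEmit_false]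
          · have hF' : ¬ (['F','a','l','s','e'] <+:
                c :: pvScanRepl ['T','r','u','e'] ['t','r','u','e'] cs) := by
              intro hh
              obtain ⟨hc, htail⟩ := List.cons_prefix_cons.mp hh
              exact hF (List.cons_prefix_cons.mpr ⟨hc,
                (pvPrefix_scanT ['a','l','s','e'] (by intro x hx; fin_cases hx <;> exact ⟨by decide, by decide⟩) cs).mp htail⟩)
            simp only [List.length_cons] at hl
            rw [pvScanT_char _ _ hT, pvScanF_char _ _ hF', ih cs (by omega),
              pvEmit_char _ _ hT hF]
  exact H l.length l le_rfl

theorem pvFixSeg_out (cs : List Char) : pvFixSeg (false, cs) = pvEmit cs := by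
  have h : pvFixSeg (false, cs)
      = PySem.Chars.replace (PySem.Chars.replace cs ['T','r','u','e'] ['t','r','u','e'])
          ['F','a','l','s','e'] ['f','a','l','s','e'] := by
    simp [pvFixSeg, pvTl, pvtl, pvFl, pvfl]
  rw [h, pvReplace_eq_scanRepl _ _ _ (by decide), pvReplace_eq_scanRepl _ _ _ (by decide)]
  exact pvScan_comp cs

theorem pvFixSeg_in (cs : List Char) : pvFixSeg (true, cs) = cs := rfl

theorem pvRender_append (L1 L2 : List (Bool × List Char)) :
    pvRender (L1 ++ L2) = pvRender L1 ++ pvRender L2 := by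
  simp [pvRender]

theorem pvRender_cons (x : Bool × List Char) (r : List (Bool × List Char)) :
    pvRender (x :: r) = pvFixSeg x ++ pvRender r := by
  simp [pvRender]

theorem pvFixSeg_nil (q : Bool) : pvFixSeg (q, []) = [] := by
  cases q
  · rw [pvFixSeg_out, pvEmit]
  · rfl

theorem pvBsegs_stop (s : List Char) (i : Nat) (q : Bool) (h : ¬ i < s.length) :
    pvBsegs s i q = [(q, [])] := by
  rw [pvBsegs, if_neg h]

theorem pvBsegs_tog (s : List Char) (i : Nat) (q : Bool) (h : i < s.length)
    (ht : pvTog s i = true) :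
    pvBsegs s i q = (q, []) :: pvConsHead (s.getD i ' ') (pvBsegs s (i + 1) (!q)) := by
  rw [pvBsegs, if_pos h, if_pos ht]

theorem pvBsegs_notog (s : List Char) (i : Nat) (q : Bool) (h : i < s.length)
    (ht : pvTog s i = false) :
    pvBsegs s i q = pvConsHead (s.getD i ' ') (pvBsegs s (i + 1) q) := by
  rw [pvBsegs, if_pos h, if_neg (by simp [ht])]

theorem pvTog_iff (s : List Char) (i : Nat) :
    (s.getD i ' ' = '"' ∧ 0 < i ∧ s.getD (i - 1) ' ' ≠ '\\') ↔ pvTog s i = true := by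
  simp [pvTog]

theorem pvNoPre_of_head (s : List Char) (i : Nat) (h : i < s.length) (c : Char)
    (hc : s[i] ≠ c) (p : List Char) : ¬ ((c :: p) <+: s.drop i) := by
  rw [List.drop_eq_getElem_cons h]
  exact fun hh => hc ((List.cons_prefix_cons.mp hh).1).symm

theorem pvSlice_iff_T (s : List Char) (i : Nat) :
    (PySem.List.slice s (some (i : Int)) (some ((i : Int) + 4)) = "True".toList) ↔
      ['T','r','u','e'] <+: s.drop i := by
  rw [pvTl, show ((4:Int)) = ((4:Nat):Int) by norm_num, PySem.List.slice_natCast_add]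
  constructor
  · intro hh
    rw [List.prefix_iff_eq_take]
    simpa using hh.symm
  · intro hh
    have := List.prefix_iff_eq_take.mp hh
    simpa using this.symm

theorem pvSlice_iff_F (s : List Char) (i : Nat) :
    (PySem.List.slice s (some (i : Int)) (some ((i : Int) + 5)) = "False".toList) ↔
      ['F','a','l','s','e'] <+: s.drop i := by
  rw [pvFl, show ((5:Int)) = ((5:Nat):Int) by norm_num, PySem.List.slice_natCast_add]
  constructor
  · intro hh
    rw [List.prefix_iff_eq_take]
    simpa using hh.symm
  · intro hh
    have := List.prefix_iff_eq_take.mp hh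
    simpa using this.symm

theorem pvBsegs_head (s : List Char) : ∀ (k i : Nat) (q : Bool), s.length - i ≤ k →
    ∃ cs r, pvBsegs s i q = (q, cs) :: r ∧ cs <+: s.drop i := by
  intro k
  induction k with
  | zero =>
    intro i q hk
    exact ⟨[], [], pvBsegs_stop s i q (by omega), List.nil_prefix⟩
  | succ n ih =>
    intro i q hk
    by_cases h : i < s.length
    · by_cases ht : pvTog s i = true
      · exact ⟨[], _, pvBsegs_tog s i q h ht, List.nil_prefix⟩
      · obtain ⟨cs, r, heq, hpre⟩ := ih (i + 1) q (by omega)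
        refine ⟨s.getD i ' ' :: cs, r, ?_, ?_⟩
        · rw [pvBsegs_notog s i q h (by simpa using ht), heq]
          rfl
        · rw [List.drop_eq_getElem_cons h, ← List.getD_eq_getElem s ' ' h]
          exact List.cons_prefix_cons.mpr ⟨rfl, hpre⟩
    · exact ⟨[], [], pvBsegs_stop s i q h, List.nil_prefix⟩

theorem pvBsegs_step (s : List Char) (i : Nat) (q : Bool) (h : i < s.length)
    (hcase : (if pvTog s i then !q else q) = true ∨
      (¬ ['T','r','u','e'] <+: s.drop i ∧ ¬ ['F','a','l','s','e'] <+: s.drop i)) :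
    pvRender (pvBsegs s i q) = s[i] :: pvRender (pvBsegs s (i + 1) (if pvTog s i then !q else q)) := by
  obtain ⟨cs, r, heq, hpre⟩ := pvBsegs_head s s.length (i + 1) (if pvTog s i then !q else q) (by omega)
  have hpre' : s[i] :: cs <+: s.drop i := by
    rw [List.drop_eq_getElem_cons h]
    exact List.cons_prefix_cons.mpr ⟨rfl, hpre⟩
  have hrender : pvRender ((if pvTog s i then !q else q, s[i] :: cs) :: r)
      = s[i] :: pvRender ((if pvTog s i then !q else q, cs) :: r) := by
    by_cases hq : (if pvTog s i then !q else q) = true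
    · rw [hq, pvRender_cons, pvRender_cons, pvFixSeg_in, pvFixSeg_in]
      simp
    · have hq0 : (if pvTog s i then !q else q) = false := by
        cases hqq : (if pvTog s i then !q else q) <;> simp_all
      rcases hcase with hct | ⟨hT, hF⟩
      · exact absurd hct hq
      rw [hq0, pvRender_cons, pvRender_cons, pvFixSeg_out, pvFixSeg_out,
        pvEmit_char _ _ (fun hh => hT (hh.trans hpre')) (fun hh => hF (hh.trans hpre'))]
      simp
  have hchar : s.getD i ' ' = s[i] := List.getD_eq_getElem s ' ' h
  by_cases ht : pvTog s i = true
  · rw [if_pos ht] at heq hrender ⊢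
    rw [pvBsegs_tog s i q h ht, hchar, heq]
    simp only [pvConsHead]
    rw [pvRender_cons, pvFixSeg_nil, List.nil_append, hrender]
  · have ht' : pvTog s i = false := by simpa using ht
    rw [if_neg ht] at heq hrender ⊢
    rw [pvBsegs_notog s i q h ht', hchar, heq]
    simp only [pvConsHead]
    rw [hrender]

theorem pvTog_false_of_ne (s : List Char) (i : Nat) (h : i < s.length)
    (hc : s[i] ≠ '"') : pvTog s i = false := by
  simp only [pvTog]
  rw [List.getD_eq_getElem s ' ' h]
  simp [hc]

theorem pvChunk_true (s : List Char) (i : Nat) (h : i < s.length)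
    (h4 : ['T','r','u','e'] <+: s.drop i) (htog : pvTog s i = false) :
    pvRender (pvBsegs s i false) = 't'::'r'::'u'::'e':: pvRender (pvBsegs s (i + 4) false) := by
  obtain ⟨rest, hrest⟩ := h4
  have hd : s.drop i = 'T'::'r'::'u'::'e'::rest := by
    rw [← hrest]; rfl
  have hlen : s.length - i = 4 + rest.length := by
    have := congrArg List.length hd
    simp at this
    omega
  have h1 : i + 1 < s.length := by omega
  have h2 : i + 1 + 1 < s.length := by omega
  have h3 : i + 1 + 1 + 1 < s.length := by omega
  have e0 := (List.drop_eq_getElem_cons h).symm.trans hd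
  injection e0 with g0 hd1
  have e1 := (List.drop_eq_getElem_cons h1).symm.trans hd1
  injection e1 with g1 hd2
  have e2 := (List.drop_eq_getElem_cons h2).symm.trans hd2
  injection e2 with g2 hd3
  have e3 := (List.drop_eq_getElem_cons h3).symm.trans hd3
  injection e3 with g3 hd4
  have t1 : pvTog s (i + 1) = false := pvTog_false_of_ne s _ h1 (by rw [g1]; decide)
  have t2 : pvTog s (i + 1 + 1) = false := pvTog_false_of_ne s _ h2 (by rw [g2]; decide)
  have t3 : pvTog s (i + 1 + 1 + 1) = false := pvTog_false_of_ne s _ h3 (by rw [g3]; decide)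
  rw [pvBsegs_notog s i false h htog, List.getD_eq_getElem s ' ' h, g0,
    pvBsegs_notog s (i + 1) false h1 t1, List.getD_eq_getElem s ' ' h1, g1,
    pvBsegs_notog s (i + 1 + 1) false h2 t2, List.getD_eq_getElem s ' ' h2, g2,
    pvBsegs_notog s (i + 1 + 1 + 1) false h3 t3, List.getD_eq_getElem s ' ' h3, g3,
    show i + 1 + 1 + 1 + 1 = i + 4 from by omega]
  obtain ⟨cs, r, heq, _⟩ := pvBsegs_head s s.length (i + 4) false (by omega)
  rw [heq]
  simp only [pvConsHead]
  rw [pvRender_cons, pvRender_cons, pvFixSeg_out, pvFixSeg_out, pvEmit_true]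
  simp

theorem pvChunk_false (s : List Char) (i : Nat) (h : i < s.length)
    (h5 : ['F','a','l','s','e'] <+: s.drop i) (htog : pvTog s i = false) :
    pvRender (pvBsegs s i false) = 'f'::'a'::'l'::'s'::'e':: pvRender (pvBsegs s (i + 5) false) := by
  obtain ⟨rest, hrest⟩ := h5
  have hd : s.drop i = 'F'::'a'::'l'::'s'::'e'::rest := by
    rw [← hrest]; rfl
  have hlen : s.length - i = 5 + rest.length := by
    have := congrArg List.length hd
    simp at this
    omega
  have h1 : i + 1 < s.length := by omega
  have h2 : i + 1 + 1 < s.length := by omega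
  have h3 : i + 1 + 1 + 1 < s.length := by omega
  have h4' : i + 1 + 1 + 1 + 1 < s.length := by omega
  have e0 := (List.drop_eq_getElem_cons h).symm.trans hd
  injection e0 with g0 hd1
  have e1 := (List.drop_eq_getElem_cons h1).symm.trans hd1
  injection e1 with g1 hd2
  have e2 := (List.drop_eq_getElem_cons h2).symm.trans hd2
  injection e2 with g2 hd3
  have e3 := (List.drop_eq_getElem_cons h3).symm.trans hd3
  injection e3 with g3 hd4
  have e4 := (List.drop_eq_getElem_cons h4').symm.trans hd4
  injection e4 with g4 hd5
  have t1 : pvTog s (i + 1) = false := pvTog_false_of_ne s _ h1 (by rw [g1]; decide)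
  have t2 : pvTog s (i + 1 + 1) = false := pvTog_false_of_ne s _ h2 (by rw [g2]; decide)
  have t3 : pvTog s (i + 1 + 1 + 1) = false := pvTog_false_of_ne s _ h3 (by rw [g3]; decide)
  have t4 : pvTog s (i + 1 + 1 + 1 + 1) = false := pvTog_false_of_ne s _ h4' (by rw [g4]; decide)
  rw [pvBsegs_notog s i false h htog, List.getD_eq_getElem s ' ' h, g0,
    pvBsegs_notog s (i + 1) false h1 t1, List.getD_eq_getElem s ' ' h1, g1,
    pvBsegs_notog s (i + 1 + 1) false h2 t2, List.getD_eq_getElem s ' ' h2, g2,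
    pvBsegs_notog s (i + 1 + 1 + 1) false h3 t3, List.getD_eq_getElem s ' ' h3, g3,
    pvBsegs_notog s (i + 1 + 1 + 1 + 1) false h4' t4, List.getD_eq_getElem s ' ' h4', g4,
    show i + 1 + 1 + 1 + 1 + 1 = i + 5 from by omega]
  obtain ⟨cs, r, heq, _⟩ := pvBsegs_head s s.length (i + 5) false (by omega)
  rw [heq]
  simp only [pvConsHead]
  rw [pvRender_cons, pvRender_cons, pvFixSeg_out, pvFixSeg_out, pvEmit_false]
  simp

theorem pvDecNe_cons (c : Char) (x y : List Char) :
    decide (x ≠ y) = decide ((c :: x) ≠ (c :: y)) :=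
  decide_eq_decide.mpr (not_congr ⟨fun hh => by rw [hh], fun hh => (List.cons_eq_cons.mp hh).2⟩)

theorem pvRender_singleton_nil (q : Bool) : pvRender [(q, [])] = [] := by
  rw [pvRender_cons, pvFixSeg_nil]
  rfl

theorem pvMainA (s : List Char) : ∀ (k i : Nat) (q : Bool) (acc : List Char) (m : Bool),
    s.length - i ≤ k →
    pvLoopA s i q acc m =
      (acc ++ pvRender (pvBsegs s i q), m || decide (pvRender (pvBsegs s i q) ≠ s.drop i)) := by
  intro k
  induction k with
  | zero =>
    intro i q acc m hk
    have h : ¬ i < s.length := by omega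
    rw [pvLoopA, if_neg h, pvBsegs_stop s i q h, pvRender_singleton_nil,
      List.drop_of_length_le (by omega)]
    simp
  | succ n ih =>
    intro i q acc m hk
    by_cases h : i < s.length
    · have hdropcons := List.drop_eq_getElem_cons h
      have hchar : s.getD i ' ' = s[i] := List.getD_eq_getElem s ' ' h
      rw [pvLoopA]
      simp only [h, if_true]
      by_cases ht : pvTog s i = true
      · -- the current char is a toggling quote: no True/False can match here
        have hquote : s[i] = '"' := by
          rw [← hchar]
          exact ((pvTog_iff s i).mpr ht).1
        have hTm : ¬ ['T','r','u','e'] <+: s.drop i :=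
          pvNoPre_of_head s i h 'T' (by rw [hquote]; decide) _
        have hFm : ¬ ['F','a','l','s','e'] <+: s.drop i :=
          pvNoPre_of_head s i h 'F' (by rw [hquote]; decide) _
        have hstep := pvBsegs_step s i q h (Or.inr ⟨hTm, hFm⟩)
        rw [if_pos ht] at hstep
        rw [if_pos ((pvTog_iff s i).mpr ht)]
        by_cases hq : (!q) = false
        · rw [if_pos hq, if_neg (fun hh => hTm ((pvSlice_iff_T s i).mp hh)),
            if_neg (fun hh => hFm ((pvSlice_iff_F s i).mp hh)),
            ih (i + 1) (!q) _ _ (by omega), hstep, hchar, hdropcons, ← pvDecNe_cons,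
            List.append_assoc]
          rfl
        · rw [if_neg hq, ih (i + 1) (!q) _ _ (by omega), hstep, hchar, hdropcons,
            ← pvDecNe_cons, List.append_assoc]
          rfl
      · have ht' : pvTog s i = false := by simpa using ht
        rw [if_neg (fun hh => ht ((pvTog_iff s i).mp hh))]
        by_cases hq : q = false
        · subst hq
          rw [if_pos rfl]
          by_cases hTs : PySem.List.slice s (some (i : Int)) (some ((i : Int) + 4)) = "True".toList
          · have hT : ['T','r','u','e'] <+: s.drop i := (pvSlice_iff_T s i).mp hTs
            rw [if_pos hTs, ih (i + 4) false _ _ (by omega), pvChunk_true s i h hT ht']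
            obtain ⟨rest, hrest⟩ := hT
            have hne : ('t'::'r'::'u'::'e':: pvRender (pvBsegs s (i + 4) false)) ≠ s.drop i := by
              rw [← hrest]
              intro hh
              injection hh with h1 _
              exact absurd h1 (by decide)
            rw [decide_eq_true hne, Bool.or_true, Bool.true_or, pvtl, List.append_assoc]
            rfl
          · by_cases hFs : PySem.List.slice s (some (i : Int)) (some ((i : Int) + 5)) = "False".toList
            · have hF : ['F','a','l','s','e'] <+: s.drop i := (pvSlice_iff_F s i).mp hFs
              rw [if_neg hTs, if_pos hFs, ih (i + 5) false _ _ (by omega),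
                pvChunk_false s i h hF ht']
              obtain ⟨rest, hrest⟩ := hF
              have hne : ('f'::'a'::'l'::'s'::'e':: pvRender (pvBsegs s (i + 5) false)) ≠ s.drop i := by
                rw [← hrest]
                intro hh
                injection hh with h1 _
                exact absurd h1 (by decide)
              rw [decide_eq_true hne, Bool.or_true, Bool.true_or, pvfl, List.append_assoc]
              rfl
            · have hstep := pvBsegs_step s i false h
                (Or.inr ⟨fun hh => hTs ((pvSlice_iff_T s i).mpr hh),
                  fun hh => hFs ((pvSlice_iff_F s i).mpr hh)⟩)
              simp only [ht', Bool.false_eq_true, if_false] at hstep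
              rw [if_neg hTs, if_neg hFs, ih (i + 1) false _ _ (by omega), hstep, hchar,
                hdropcons, ← pvDecNe_cons, List.append_assoc]
              rfl
        · have hqt : q = true := by simpa using hq
          subst hqt
          rw [if_neg (by simp), ih (i + 1) true _ _ (by omega)]
          have hstep := pvBsegs_step s i true h (by left; simp [ht'])
          simp only [ht', Bool.false_eq_true, if_false] at hstep
          rw [hstep, hchar, hdropcons, ← pvDecNe_cons, List.append_assoc]
          rfl
    · have hk0 : s.length - i ≤ 0 := by omega
      rw [pvLoopA, if_neg h, pvBsegs_stop s i q h, pvRender_singleton_nil,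
        List.drop_of_length_le (by omega)]
      simp

theorem pvStepB_at (s : List Char) (segs : List (Bool × List Char)) (buf : List Char)
    (q : Bool) (i : Nat) (h : i < s.length) :
    pvStepB s (segs, buf, q) ((i : Int), s[i]) =
      if pvTog s i then (segs ++ [(q, buf)], [s[i]], !q) else (segs, buf ++ [s[i]], q) := by
  have hiff : (s[i] = '"' ∧ 0 < (i : Int) ∧ PySem.List.pyGetD s ((i : Int) - 1) ' ' ≠ '\\')
      ↔ pvTog s i = true := by
    by_cases hi : 0 < i
    · have hcast : (i : Int) - 1 = ((i - 1 : Nat) : Int) := by omega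
      rw [hcast, PySem.List.pyGetD_natCast]
      simp only [pvTog]
      rw [List.getD_eq_getElem s ' ' h]
      simp [hi]
    · have hi0 : i = 0 := by omega
      subst hi0
      simp [pvTog]
  simp only [pvStepB]
  by_cases ht : pvTog s i = true
  · cases q
    · rw [if_pos ⟨hiff.mpr ht, rfl⟩, if_pos ht]
      rfl
    · rw [if_neg (by simp), if_pos ⟨hiff.mpr ht, rfl⟩, if_pos ht]
      rfl
  · rw [if_neg (fun hh => ht (hiff.mp hh.1)), if_neg (fun hh => ht (hiff.mp hh.1)),
      if_neg ht]

theorem pvPrep_cons (buf : List Char) (c : Char) (L : List (Bool × List Char)) :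
    pvPrepHead buf (pvConsHead c L) = pvPrepHead (buf ++ [c]) L := by
  match L with
  | [] => simp [pvConsHead, pvPrepHead]
  | (t, cs) :: r => simp [pvConsHead, pvPrepHead]

theorem pvFoldB (s : List Char) : ∀ (k i : Nat) (segs : List (Bool × List Char))
    (buf : List Char) (q : Bool), s.length - i ≤ k →
    (let st := (((PySem.List.enumerate s).drop i).foldl (pvStepB s) (segs, buf, q));
      pvRender (st.1 ++ [(st.2.2, st.2.1)]))
      = pvRender segs ++ pvRender (pvPrepHead buf (pvBsegs s i q)) := by
  intro k
  induction k with
  | zero =>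
    intro i segs buf q hk
    have h : ¬ i < s.length := by omega
    have hnil : (PySem.List.enumerate s).drop i = [] :=
      List.drop_of_length_le (by rw [PySem.List.length_enumerate]; omega)
    rw [hnil]
    rw [pvBsegs_stop s i q h]
    simp [pvPrepHead, pvRender_append]
  | succ n ih =>
    intro i segs buf q hk
    by_cases h : i < s.length
    · have hdropE : (PySem.List.enumerate s).drop i
          = ((i : Int), s[i]) :: (PySem.List.enumerate s).drop (i + 1) := by
        rw [List.drop_eq_getElem_cons (by rw [PySem.List.length_enumerate]; exact h)]
        rw [PySem.List.getElem_enumerate]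
        norm_num
      have hchar : s.getD i ' ' = s[i] := List.getD_eq_getElem s ' ' h
      rw [hdropE, List.foldl_cons, pvStepB_at s segs buf q i h]
      by_cases ht : pvTog s i = true
      · rw [if_pos ht, ih (i + 1) (segs ++ [(q, buf)]) [s[i]] (!q) (by omega),
          pvBsegs_tog s i q h ht, hchar]
        obtain ⟨cs, r, heq, _⟩ := pvBsegs_head s s.length (i + 1) (!q) (by omega)
        rw [heq]
        simp [pvPrepHead, pvConsHead, pvRender, List.append_assoc]
      · have ht' : pvTog s i = false := by simpa using ht
        rw [if_neg ht, ih (i + 1) segs (buf ++ [s[i]]) q (by omega),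
          pvBsegs_notog s i q h ht', hchar, pvPrep_cons]
    · have hnil : (PySem.List.enumerate s).drop i = [] :=
        List.drop_of_length_le (by rw [PySem.List.length_enumerate]; omega)
      rw [hnil]
      rw [pvBsegs_stop s i q h]
      simp [pvPrepHead, pvRender_append]

theorem pvOfList_ne_iff (R : List Char) (j : String) :
    (String.ofList R ≠ j) ↔ (R ≠ j.toList) :=
  not_congr ⟨fun hh => by rw [← hh, String.toList_ofList],
    fun hh => by rw [hh, String.ofList_toList]⟩

-- ===== VERDICT (by name: the statement is the Claim_ definition above) =====
theorem fix_bools_spec : Claim_equal_fix_bools := by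
  intro j _
  unfold Spec_fix_bools
  have hA := pvMainA j.toList j.toList.length 0 false [] false (by omega)
  have hB := pvFoldB j.toList j.toList.length 0 [] [] false (by omega)
  simp only [List.drop_zero] at hA hB
  obtain ⟨cs, r, heq, _⟩ := pvBsegs_head j.toList j.toList.length 0 false (by omega)
  rw [heq] at hB
  simp only [pvPrepHead, List.nil_append] at hB
  rw [← heq] at hB
  simp only [fix_bools, fix_bools_alt]
  rw [hA]
  have hrdef : ∀ L : List (Bool × List Char), (L.map pvFixSeg).flatten = pvRender L :=
    fun L => rfl
  rw [hrdef, hB]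
  rw [show pvRender [] ++ pvRender (pvBsegs j.toList 0 false)
      = pvRender (pvBsegs j.toList 0 false) from by simp [pvRender]]
  rw [show ([] : List Char) ++ pvRender (pvBsegs j.toList 0 false)
      = pvRender (pvBsegs j.toList 0 false) from by simp]
  rw [Bool.false_or]
  rw [decide_eq_decide.mpr (pvOfList_ne_iff (pvRender (pvBsegs j.toList 0 false)) j)]
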